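-- pv_equiv track=rewrite | github.com/sgerhart/clarion | src/clarion/policy/sgacl.py | _sanitize_name
-- ===== SOURCE A (Python) =====
-- def _sanitize_name(name: str) -> str:
--     """Sanitize a name for use in Cisco ACL names."""
--     # Replace spaces and special chars with underscores
--     result = ""
--     for c in name:
--         if c.isalnum():
--             result += c
--         elif c in " -_":
--             result += "_"
--     # Remove consecutive underscores
--     while "__" in result:
--         result = result.replace("__", "_")
--     return result.strip("_")
-- ===== SOURCE B (Python) =====
-- def _sanitize_name(name: str) -> str:
--     """Sanitize a name for use in Cisco ACL names."""
--     # Single pass: collect alphanumeric runs as words; " -_" flushes the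
--     # current word; any other character is dropped without breaking the word.
--     # Joining the nonempty words with "_" collapses and strips underscores.
--     words = []
--     buf = []
--     for c in name:
--         if c.isalnum():
--             buf.append(c)
--         elif c in " -_":
--             words.append(buf)
--             buf = []
--     words.append(buf)
--     return "_".join("".join(w) for w in words if w)
-- ===== Notes on version B (the rewrite author's own statement) =====
-- stated objective: alternative
-- what changed: Replaces A's build-then-fixpoint approach (encode the string, then repeatedly collapse doubled underscores until fixed, then strip) by a single tokenizing pass that buffers alphanumeric runs, flushes the buffer on separator characters, and joins the nonempty words with an underscore, which yields the collapsing and stripping for free.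
import Mathlib
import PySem

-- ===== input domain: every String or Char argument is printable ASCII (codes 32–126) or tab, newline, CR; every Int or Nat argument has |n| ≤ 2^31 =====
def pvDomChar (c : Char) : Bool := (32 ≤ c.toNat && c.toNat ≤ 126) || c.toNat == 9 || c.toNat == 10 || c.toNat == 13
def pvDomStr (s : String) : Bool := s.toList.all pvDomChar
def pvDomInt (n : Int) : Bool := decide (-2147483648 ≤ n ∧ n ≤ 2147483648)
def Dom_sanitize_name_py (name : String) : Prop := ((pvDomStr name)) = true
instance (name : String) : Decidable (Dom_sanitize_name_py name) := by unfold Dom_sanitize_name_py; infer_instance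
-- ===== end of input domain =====

-- B replaces A's build-then-fixpoint approach (encode, repeatedly collapse doubled
-- underscores until fixed, strip) by a single tokenizing pass whose nonempty words
-- are joined with an underscore; objective: alternative (same measured cost).

-- ===== PORT A =====
-- Helpers needed by port A's termination proof: a pairwise-scan model of the
-- doubled-underscore replacement and of its substring test, with the length
-- decrease that makes the while loop terminate.
def pvMyrep : List Char → List Char
  | [] => []
  | [c] => [c]
  | a :: b :: t => if a = '_' ∧ b = '_' then '_' :: pvMyrep t else a :: pvMyrep (b :: t)

def pvHasDouble : List Char → Bool
  | a :: b :: t => (a == '_' && b == '_') || pvHasDouble (b :: t)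
  | _ => false

theorem pv_replace_go_spec (fuel : Nat) (l acc : List Char) (h : l.length ≤ fuel) :
    PySem.Chars.replace.go ['_', '_'] ['_'] fuel l acc = acc.reverse ++ pvMyrep l := by
  induction fuel generalizing l acc with
  | zero =>
    have : l = [] := by cases l <;> simp_all
    subst this; simp [PySem.Chars.replace.go, pvMyrep]
  | succ fuel ih =>
    match l with
    | [] => simp [PySem.Chars.replace.go, pvMyrep]
    | [c] =>
      simp only [PySem.Chars.replace.go]
      have hp : (['_', '_'] : List Char).isPrefixOf [c] = false := by
        simp [List.isPrefixOf]
      rw [hp]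
      rw [if_neg (by simp)]
      rw [ih [] (c :: acc) (by simp)]
      simp [pvMyrep]
    | a :: b :: t =>
      simp only [PySem.Chars.replace.go]
      by_cases hab : a = '_' ∧ b = '_'
      · obtain ⟨ha, hb⟩ := hab; subst ha; subst hb
        have hp : (['_', '_'] : List Char).isPrefixOf ('_' :: '_' :: t) = true := by
          simp [List.isPrefixOf]
        rw [if_pos hp]
        rw [show (['_','_'] : List Char).length = 2 from rfl]
        rw [show List.drop 2 ('_' :: '_' :: t) = t from rfl]
        rw [ih t _ (by simp at h; omega)]
        simp [pvMyrep]
      · have hp : (['_', '_'] : List Char).isPrefixOf (a :: b :: t) = false := by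
          simp only [List.isPrefixOf, Bool.and_true,
            Bool.and_eq_false_iff, beq_eq_false_iff_ne, ne_eq]
          by_cases ha : a = '_'
          · subst ha
            by_cases hb : b = '_'
            · exact absurd ⟨rfl, hb⟩ hab
            · right; exact fun e => hb e.symm
          · left; exact fun e => ha e.symm
        rw [if_neg (by simp [hp])]
        rw [ih (b :: t) (a :: acc) (by simp at h ⊢; omega)]
        simp [pvMyrep, if_neg hab]

theorem pv_infix_double (s : List Char) :
    (['_', '_'] : List Char) <:+: s ↔ pvHasDouble s = true := by
  induction s with
  | nil => simp [pvHasDouble]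
  | cons a t ih =>
    cases t with
    | nil =>
      simp only [pvHasDouble]
      constructor
      · intro hinf
        have := hinf.length_le
        simp at this
      · simp
    | cons b t2 =>
      rw [List.infix_cons_iff]
      simp only [pvHasDouble, Bool.or_eq_true, Bool.and_eq_true, beq_iff_eq]
      rw [ih]
      constructor
      · rintro (hpre | hinf)
        · left
          rcases hpre with ⟨r, hr⟩
          simp only [List.cons_append] at hr
          exact ⟨(List.cons.inj hr).1.symm, ((List.cons.inj (List.cons.inj hr).2)).1.symm⟩
        · right; exact hinf
      · rintro (⟨ha, hb⟩ | hd)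
        · subst ha; subst hb
          left; exact ⟨t2, rfl⟩
        · right; exact hd

theorem pv_myrep_length_le (s : List Char) : (pvMyrep s).length ≤ s.length := by
  induction s using pvMyrep.induct with
  | case1 => simp [pvMyrep]
  | case2 c => simp [pvMyrep]
  | case3 a b t hab ih => simp only [pvMyrep, if_pos hab]; simp at ih ⊢; omega
  | case4 a b t hab ih => simp only [pvMyrep, if_neg hab]; simp at ih ⊢; omega

theorem pv_myrep_length_lt (s : List Char) (h : pvHasDouble s = true) :
    (pvMyrep s).length < s.length := by
  induction s using pvMyrep.induct with
  | case1 => simp [pvHasDouble] at h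
  | case2 c => simp [pvHasDouble] at h
  | case3 a b t hab ih =>
    simp only [pvMyrep, if_pos hab]
    have := pv_myrep_length_le t
    simp only [List.length_cons]
    omega
  | case4 a b t hab ih =>
    simp only [pvMyrep, if_neg hab]
    simp only [pvHasDouble, Bool.or_eq_true, Bool.and_eq_true, beq_iff_eq] at h
    rcases h with ⟨ha, hb⟩ | hd
    · exact absurd ⟨ha, hb⟩ hab
    · have := ih hd
      simp only [List.length_cons] at this ⊢
      omega

theorem pv_replace_eq_myrep (s : List Char) :
    PySem.Chars.replace s ['_', '_'] ['_'] = pvMyrep s := by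
  rw [PySem.Chars.replace]
  simpa using pv_replace_go_spec s.length s [] le_rfl

theorem pv_isIn_double (s : List Char) :
    PySem.Chars.isIn ['_', '_'] s = pvHasDouble s := by
  rw [Bool.eq_iff_iff, PySem.Chars.isIn_iff_infix]
  exact pv_infix_double s

def pvCollapseLoop (s : List Char) : List Char :=
  if h : PySem.Chars.isIn ['_', '_'] s = true then
    pvCollapseLoop (PySem.Chars.replace s ['_', '_'] ['_'])
  else s
termination_by s.length
decreasing_by
  rw [pv_replace_eq_myrep]
  exact pv_myrep_length_lt s (by rwa [pv_isIn_double] at h)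


def sanitize_name_py (name : String) : String :=
  let result := name.toList.foldl
    (fun r c =>
      if PySem.Chars.isalnum c then r ++ [c]
      else if PySem.Chars.isIn [c] [' ', '-', '_'] then r ++ ['_']
      else r) []
  String.mk (PySem.Chars.stripChars (pvCollapseLoop result) ['_'])

-- ===== PORT B =====
def sanitize_name_py_alt (name : String) : String :=
  let st := name.toList.foldl
    (fun st c =>
      if PySem.Chars.isalnum c then (st.1, st.2 ++ [c])
      else if PySem.Chars.isIn [c] [' ', '-', '_'] then (st.1 ++ [st.2], [])
      else st)
    (([] : List (List Char)), ([] : List Char))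
  String.mk (PySem.Chars.join ['_'] ((st.1 ++ [st.2]).filter (fun w => !w.isEmpty)))

-- ===== PRECONDITION & SPEC =====
def Spec_sanitize_name_py (name : String) (out : String) : Prop := out = sanitize_name_py_alt name
instance (name : String) (out : String) : Decidable (Spec_sanitize_name_py name out) := by unfold Spec_sanitize_name_py; infer_instance

-- ===== CLAIM (what is proved, stated in full; the proofs are below) =====
def Claim_equal_sanitize_name_py : Prop := ∀ (name : String), Dom_sanitize_name_py name → Spec_sanitize_name_py name (sanitize_name_py name)

-- ===== LEMMAS AND PROOFS =====
def pvCollapse : List Char → List Char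
  | [] => []
  | c :: t =>
    if c = '_' then '_' :: pvCollapse (t.dropWhile (· == '_')) else c :: pvCollapse t
termination_by s => s.length
decreasing_by
  · exact Nat.lt_succ_of_le (List.length_dropWhile_le _ _)
  · exact Nat.lt_succ_self _

theorem pv_collapse_nil : pvCollapse [] = [] := by simp [pvCollapse]

theorem pv_collapse_cons_ne (c : Char) (t : List Char) (h : c ≠ '_') :
    pvCollapse (c :: t) = c :: pvCollapse t := by
  rw [pvCollapse, if_neg h]

theorem pv_collapse_cons_us (t : List Char) :
    pvCollapse ('_' :: t) = '_' :: pvCollapse (t.dropWhile (· == '_')) := by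
  rw [pvCollapse, if_pos rfl]

theorem pv_head_dropWhile (l : List Char) (c : Char)
    (h : (l.dropWhile (· == '_')).head? = some c) : c ≠ '_' := by
  induction l with
  | nil => simp [List.dropWhile] at h
  | cons a t ih =>
    rw [List.dropWhile_cons] at h
    by_cases ha : a = '_'
    · rw [if_pos (by simp [ha])] at h; exact ih h
    · rw [if_neg (by simp [ha])] at h
      simp at h; subst h; exact ha

theorem pv_dropWhile_id (l : List Char) (h : ∀ c, l.head? = some c → c ≠ '_') :
    l.dropWhile (· == '_') = l := by
  cases l with
  | nil => simp
  | cons a t =>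
    rw [List.dropWhile_cons, if_neg]
    simp
    exact h a rfl

theorem pv_collapse_head (s : List Char) (h : ∀ c, s.head? = some c → c ≠ '_') :
    ∀ c, (pvCollapse s).head? = some c → c ≠ '_' := by
  cases s with
  | nil => simp [pv_collapse_nil]
  | cons a t =>
    have ha := h a rfl
    rw [pv_collapse_cons_ne a t ha]
    intro c hc; simp at hc; subst hc; exact ha

theorem pv_collapse_not_double (s : List Char) (h : pvHasDouble s = false) :
    pvCollapse s = s := by
  induction s with
  | nil => simp [pv_collapse_nil]
  | cons a t ih =>
    cases t with
    | nil =>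
      by_cases hc : a = '_'
      · subst hc; rw [pv_collapse_cons_us]; simp [pv_collapse_nil]
      · rw [pv_collapse_cons_ne a _ hc, pv_collapse_nil]
    | cons b t2 =>
      simp only [pvHasDouble, Bool.or_eq_false_iff, Bool.and_eq_false_iff, beq_eq_false_iff_ne,
        ne_eq] at h
      obtain ⟨hab, hd⟩ := h
      have ih' := ih (by simpa only [pvHasDouble] using hd)
      by_cases ha : a = '_'
      · subst ha
        have hb : b ≠ '_' := hab.resolve_left (not_not_intro rfl)
        rw [pv_collapse_cons_us]
        rw [List.dropWhile_cons, if_neg (by simp [hb])]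
        rw [ih']
      · rw [pv_collapse_cons_ne a _ ha, ih']

theorem pv_myrep_head (s : List Char) : (pvMyrep s).head? = s.head? := by
  induction s using pvMyrep.induct with
  | case1 => simp [pvMyrep]
  | case2 c => simp [pvMyrep]
  | case3 a b t hab ih =>
    rw [show pvMyrep (a :: b :: t) = '_' :: pvMyrep t from by rw [pvMyrep, if_pos hab]]
    simp [hab.1]
  | case4 a b t hab ih =>
    rw [show pvMyrep (a :: b :: t) = a :: pvMyrep (b :: t) from by rw [pvMyrep, if_neg hab]]
    simp

theorem pvDE (n : Nat) :
    (∀ s : List Char, s.length ≤ n → pvCollapse (pvMyrep s) = pvCollapse s) ∧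
    (∀ s : List Char, s.length ≤ n →
       pvCollapse ((pvMyrep s).dropWhile (· == '_')) = pvCollapse (s.dropWhile (· == '_'))) := by
  induction n using Nat.strong_induction_on with
  | _ n ih =>
    have hP : ∀ s : List Char, s.length ≤ n → pvCollapse (pvMyrep s) = pvCollapse s := by
      intro s hs
      match s with
      | [] => rfl
      | [c] => rfl
      | a :: b :: t =>
        simp only [List.length_cons] at hs
        have hn2 : 2 ≤ n := by omega
        by_cases hab : a = '_' ∧ b = '_'
        · rw [show pvMyrep (a :: b :: t) = '_' :: pvMyrep t from by rw [pvMyrep, if_pos hab]]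
          obtain ⟨ha, hb⟩ := hab; subst ha; subst hb
          rw [pv_collapse_cons_us, pv_collapse_cons_us]
          rw [List.dropWhile_cons, if_pos (by simp)]
          congr 1
          exact (ih (n - 1) (by omega)).2 t (by omega)
        · rw [show pvMyrep (a :: b :: t) = a :: pvMyrep (b :: t) from by rw [pvMyrep, if_neg hab]]
          by_cases ha : a = '_'
          · subst ha
            have hb : b ≠ '_' := fun e => hab ⟨rfl, e⟩
            rw [pv_collapse_cons_us, pv_collapse_cons_us]
            have h1 : (pvMyrep (b :: t)).dropWhile (· == '_') = pvMyrep (b :: t) := by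
              apply pv_dropWhile_id
              intro c hc
              rw [pv_myrep_head] at hc
              simp at hc; subst hc; exact hb
            have h2 : (b :: t).dropWhile (· == '_') = b :: t := by
              rw [List.dropWhile_cons, if_neg (by simp [hb])]
            rw [h1, h2]
            congr 1
            exact (ih (n - 1) (by omega)).1 (b :: t) (by simp; omega)
          · rw [pv_collapse_cons_ne a _ ha, pv_collapse_cons_ne a _ ha]
            congr 1
            exact (ih (n - 1) (by omega)).1 (b :: t) (by simp; omega)
    refine ⟨hP, ?_⟩
    intro s hs
    match s with
    | [] => rfl
    | a :: t =>
      by_cases ha : a = '_'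
      · subst ha
        match t with
        | [] => rfl
        | b :: t2 =>
          simp only [List.length_cons] at hs
          by_cases hb : b = '_'
          · subst hb
            rw [show pvMyrep ('_' :: '_' :: t2) = '_' :: pvMyrep t2 from by
              rw [pvMyrep, if_pos ⟨rfl, rfl⟩]]
            rw [List.dropWhile_cons, if_pos (by simp)]
            rw [List.dropWhile_cons, if_pos (by simp)]
            rw [List.dropWhile_cons, if_pos (by simp)]
            exact (ih (n - 1) (by omega)).2 t2 (by omega)
          · rw [show pvMyrep ('_' :: b :: t2) = '_' :: pvMyrep (b :: t2) from by
              rw [pvMyrep, if_neg (by rintro ⟨-, e⟩; exact hb e)]]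
            rw [List.dropWhile_cons, if_pos (by simp)]
            rw [List.dropWhile_cons, if_pos (by simp)]
            have h1 : (pvMyrep (b :: t2)).dropWhile (· == '_') = pvMyrep (b :: t2) := by
              apply pv_dropWhile_id
              intro c hc
              rw [pv_myrep_head] at hc
              simp at hc; subst hc; exact hb
            have h2 : (b :: t2).dropWhile (· == '_') = b :: t2 := by
              rw [List.dropWhile_cons, if_neg (by simp [hb])]
            rw [h1, h2]
            exact hP (b :: t2) (by simp; omega)
      · have h1 : (pvMyrep (a :: t)).dropWhile (· == '_') = pvMyrep (a :: t) := by
          apply pv_dropWhile_id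
          intro c hc
          rw [pv_myrep_head] at hc
          simp at hc; subst hc; exact ha
        have h2 : (a :: t).dropWhile (· == '_') = a :: t := by
          rw [List.dropWhile_cons, if_neg (by simp [ha])]
        rw [h1, h2]
        exact hP (a :: t) hs

theorem pv_collapse_myrep (s : List Char) : pvCollapse (pvMyrep s) = pvCollapse s :=
  (pvDE s.length).1 s le_rfl

theorem pv_loop_eq_collapse (s : List Char) : pvCollapseLoop s = pvCollapse s := by
  induction s using pvCollapseLoop.induct with
  | case1 s h ih =>
    rw [pvCollapseLoop, dif_pos h, ih, pv_replace_eq_myrep, pv_collapse_myrep]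
  | case2 s h =>
    rw [pvCollapseLoop, dif_neg h]
    have hd : pvHasDouble s = false := by
      rw [← pv_isIn_double]; simpa using h
    exact (pv_collapse_not_double s hd).symm

def pvEnc : List Char → List Char
  | [] => []
  | c :: t =>
    if PySem.Chars.isalnum c then c :: pvEnc t
    else if PySem.Chars.isIn [c] [' ', '-', '_'] then '_' :: pvEnc t
    else pvEnc t

def pvTailJoin : List (List Char) → List Char
  | [] => []
  | w :: rest => '_' :: (w ++ pvTailJoin rest)

def pvInter : List (List Char) → List Char
  | [] => []
  | w :: rest => w ++ pvTailJoin rest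

theorem pv_tailJoin_append (xs : List (List Char)) (w : List Char) :
    pvTailJoin (xs ++ [w]) = pvTailJoin xs ++ '_' :: w := by
  induction xs with
  | nil => simp [pvTailJoin]
  | cons v rest ih => simp [pvTailJoin, ih]

theorem pv_inter_snoc_ext (ws : List (List Char)) (b x : List Char) :
    pvInter (ws ++ [b ++ x]) = pvInter (ws ++ [b]) ++ x := by
  cases ws with
  | nil => simp [pvInter, pvTailJoin]
  | cons v rest =>
    simp only [List.cons_append, pvInter, pv_tailJoin_append]
    simp

theorem pv_inter_snoc_empty (vs : List (List Char)) (h : vs ≠ []) :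
    pvInter (vs ++ [([] : List Char)]) = pvInter vs ++ ['_'] := by
  cases vs with
  | nil => exact absurd rfl h
  | cons v rest =>
    simp only [List.cons_append, pvInter, pv_tailJoin_append]
    simp

theorem pv_foldl_enc (s : List Char) (r : List Char) :
    s.foldl (fun r c =>
      if PySem.Chars.isalnum c then r ++ [c]
      else if PySem.Chars.isIn [c] [' ', '-', '_'] then r ++ ['_']
      else r) r = r ++ pvEnc s := by
  induction s generalizing r with
  | nil => simp [pvEnc]
  | cons c t ih =>
    simp only [List.foldl_cons, pvEnc]
    by_cases h1 : PySem.Chars.isalnum c = true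
    · simp [h1, ih]
    · by_cases h2 : PySem.Chars.isIn [c] [' ', '-', '_'] = true
      · simp [h1, h2, ih]
      · simp [h1, h2, ih]

theorem pv_foldl_tok (s : List Char) (ws : List (List Char)) (buf : List Char) :
    pvInter ((s.foldl (fun st c =>
      if PySem.Chars.isalnum c then (st.1, st.2 ++ [c])
      else if PySem.Chars.isIn [c] [' ', '-', '_'] then (st.1 ++ [st.2], [])
      else st) (ws, buf)).1 ++ [(s.foldl (fun st c =>
      if PySem.Chars.isalnum c then (st.1, st.2 ++ [c])
      else if PySem.Chars.isIn [c] [' ', '-', '_'] then (st.1 ++ [st.2], [])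
      else st) (ws, buf)).2]) = pvInter (ws ++ [buf]) ++ pvEnc s := by
  induction s generalizing ws buf with
  | nil => simp [pvEnc]
  | cons c t ih =>
    simp only [List.foldl_cons, pvEnc]
    by_cases h1 : PySem.Chars.isalnum c = true
    · rw [if_pos h1, if_pos h1]
      rw [ih ws (buf ++ [c])]
      rw [pv_inter_snoc_ext]
      simp
    · rw [if_neg h1, if_neg h1]
      by_cases h2 : PySem.Chars.isIn [c] [' ', '-', '_'] = true
      · rw [if_pos h2, if_pos h2]
        rw [ih (ws ++ [buf]) []]
        rw [show (ws ++ [buf]) ++ [([] : List Char)] = (ws ++ [buf]) ++ [[]] from rfl]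
        rw [pv_inter_snoc_empty (ws ++ [buf]) (by simp)]
        simp
      · rw [if_neg h2, if_neg h2]
        exact ih ws buf

theorem pv_tok_no_underscore (s : List Char) (ws : List (List Char)) (buf : List Char)
    (hws : ∀ w ∈ ws, ('_' : Char) ∉ w) (hbuf : ('_' : Char) ∉ buf) :
    ∀ w ∈ ((s.foldl (fun st c =>
      if PySem.Chars.isalnum c then (st.1, st.2 ++ [c])
      else if PySem.Chars.isIn [c] [' ', '-', '_'] then (st.1 ++ [st.2], [])
      else st) (ws, buf)).1 ++ [(s.foldl (fun st c =>
      if PySem.Chars.isalnum c then (st.1, st.2 ++ [c])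
      else if PySem.Chars.isIn [c] [' ', '-', '_'] then (st.1 ++ [st.2], [])
      else st) (ws, buf)).2]), ('_' : Char) ∉ w := by
  induction s generalizing ws buf with
  | nil =>
    simp only [List.foldl_nil]
    intro w hw
    rcases List.mem_append.1 hw with h | h
    · exact hws w h
    · simp at h; subst h; exact hbuf
  | cons c t ih =>
    simp only [List.foldl_cons]
    by_cases h1 : PySem.Chars.isalnum c = true
    · rw [if_pos h1]
      refine ih ws (buf ++ [c]) hws ?_
      intro hm
      rcases List.mem_append.1 hm with h | h
      · exact hbuf h
      · simp at h
        rw [← h] at h1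
        exact absurd h1 (by decide)
    · rw [if_neg h1]
      by_cases h2 : PySem.Chars.isIn [c] [' ', '-', '_'] = true
      · rw [if_pos h2]
        refine ih (ws ++ [buf]) [] ?_ (by simp)
        intro w hw
        rcases List.mem_append.1 hw with h | h
        · exact hws w h
        · simp at h; subst h; exact hbuf
      · rw [if_neg h2]
        exact ih ws buf hws hbuf

theorem pv_join_eq_inter (ps : List (List Char)) :
    PySem.Chars.join ['_'] ps = pvInter ps := by
  match ps with
  | [] => simp [PySem.Chars.join_nil, pvInter]
  | [a] => simp [PySem.Chars.join_singleton, pvInter, pvTailJoin]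
  | a :: b :: t =>
    rw [PySem.Chars.join_cons_cons]
    rw [pv_join_eq_inter (b :: t)]
    simp [pvInter, pvTailJoin]

theorem pv_LD (s : List Char) :
    (pvCollapse s).dropWhile (· == '_') = pvCollapse (s.dropWhile (· == '_')) := by
  cases s with
  | nil => simp [pv_collapse_nil]
  | cons a t =>
    by_cases ha : a = '_'
    · subst ha
      rw [pv_collapse_cons_us]
      rw [List.dropWhile_cons, if_pos (by simp)]
      rw [List.dropWhile_cons, if_pos (by simp)]
      exact pv_dropWhile_id _ (pv_collapse_head _ (pv_head_dropWhile t))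
    · rw [pv_collapse_cons_ne a t ha]
      rw [List.dropWhile_cons, if_neg (by simp [ha])]
      rw [List.dropWhile_cons, if_neg (by simp [ha])]
      rw [pv_collapse_cons_ne a t ha]

theorem pv_strip_pred : (fun c => (['_'] : List Char).contains c) = (fun c : Char => c == '_') := by
  funext c
  simp only [List.contains_cons, List.contains_nil, Bool.or_false]

theorem pv_strip_collapse_cons (x : List Char) :
    PySem.Chars.stripChars (pvCollapse ('_' :: x)) ['_']
      = PySem.Chars.stripChars (pvCollapse x) ['_'] := by
  rw [PySem.Chars.stripChars, PySem.Chars.stripChars]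
  rw [pv_strip_pred]
  have h1 : (pvCollapse ('_' :: x)).dropWhile (· == '_')
      = (pvCollapse x).dropWhile (· == '_') := by
    rw [pv_LD, pv_LD]
    rw [List.dropWhile_cons, if_pos (by simp)]
  rw [h1]

theorem pv_collapse_append (w x : List Char) (h : ('_' : Char) ∉ w) :
    pvCollapse (w ++ x) = w ++ pvCollapse x := by
  induction w with
  | nil => simp
  | cons a w' ih =>
    have ha : a ≠ '_' := fun e => h (by simp [e])
    rw [List.cons_append, pv_collapse_cons_ne a _ ha, ih (fun hm => h (by simp [hm]))]
    rfl

theorem pv_collapse_tailJoin (rest : List (List Char)) (hw : ∀ w ∈ rest, ('_' : Char) ∉ w) :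
    pvCollapse (pvTailJoin rest)
      = pvTailJoin (rest.filter (fun w => !w.isEmpty))
          ++ (if rest.getLast? = some [] then ['_'] else []) := by
  induction rest with
  | nil => simp [pvTailJoin, pv_collapse_nil]
  | cons w rest' ih =>
    have hw' : ∀ v ∈ rest', ('_' : Char) ∉ v := fun v hv => hw v (by simp [hv])
    have hww : ('_' : Char) ∉ w := hw w (by simp)
    cases hwe : w with
    | nil =>
      subst hwe
      cases rest' with
      | nil =>
        rw [show pvTailJoin [([] : List Char)] = ['_'] from rfl]
        rw [pv_collapse_cons_us]
        simp [pv_collapse_nil, pvTailJoin]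
      | cons v rest2 =>
        have step : pvCollapse (pvTailJoin (([] : List Char) :: v :: rest2))
            = pvCollapse (pvTailJoin (v :: rest2)) := by
          rw [show pvTailJoin (([] : List Char) :: v :: rest2)
              = '_' :: pvTailJoin (v :: rest2) from by simp [pvTailJoin]]
          rw [show pvTailJoin (v :: rest2) = '_' :: (v ++ pvTailJoin rest2) from rfl]
          rw [pv_collapse_cons_us, pv_collapse_cons_us]
          rw [List.dropWhile_cons, if_pos (by simp)]
        rw [step, ih hw']
        rw [List.getLast?_cons_cons]
        simp
    | cons a w2 =>
      subst hwe
      have ha : a ≠ '_' := fun e => hww (by simp [e])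
      rw [show pvTailJoin ((a :: w2) :: rest') = '_' :: ((a :: w2) ++ pvTailJoin rest') from rfl]
      rw [pv_collapse_cons_us]
      rw [List.cons_append, List.dropWhile_cons, if_neg (by simp [ha]), ← List.cons_append]
      rw [pv_collapse_append _ _ hww]
      rw [ih hw']
      rw [show (List.filter (fun w => !w.isEmpty) ((a :: w2) :: rest'))
          = (a :: w2) :: List.filter (fun w => !w.isEmpty) rest' from by simp]
      rw [show pvTailJoin ((a :: w2) :: List.filter (fun w => !w.isEmpty) rest')
          = '_' :: ((a :: w2) ++ pvTailJoin (List.filter (fun w => !w.isEmpty) rest')) from rfl]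
      cases rest' with
      | nil => simp [pvTailJoin]
      | cons v rest2 =>
        rw [List.getLast?_cons_cons]
        simp

theorem pv_last_ne (rest : List (List Char)) (w : List Char) (hw : w ≠ [])
    (hwu : ('_' : Char) ∉ w) (hrest : ∀ v ∈ rest, v ≠ [] ∧ ('_' : Char) ∉ v) :
    ∀ c, (w ++ pvTailJoin rest).getLast? = some c → c ≠ '_' := by
  induction rest generalizing w with
  | nil =>
    intro c hc
    simp only [pvTailJoin, List.append_nil] at hc
    intro e; subst e
    exact hwu (List.mem_of_getLast? hc)
  | cons v rest2 ih =>
    intro c hc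
    rw [show pvTailJoin (v :: rest2) = '_' :: (v ++ pvTailJoin rest2) from rfl] at hc
    have hv := hrest v (by simp)
    have hne : ('_' :: (v ++ pvTailJoin rest2)) ≠ [] := by simp
    rw [List.getLast?_append_of_ne_nil w hne] at hc
    rw [show ('_' :: (v ++ pvTailJoin rest2)) = ['_'] ++ (v ++ pvTailJoin rest2) from rfl] at hc
    rw [List.getLast?_append_of_ne_nil ['_'] (by simp [hv.1])] at hc
    exact ih v hv.1 hv.2 (fun u hu => hrest u (by simp [hu])) c hc

theorem pv_strip_core (z : List Char) (h0 : ∀ c, z.head? = some c → c ≠ '_')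
    (h1 : ∀ c, z.getLast? = some c → c ≠ '_') (tail : List Char)
    (htail : tail = [] ∨ tail = ['_']) :
    PySem.Chars.stripChars (z ++ tail) ['_'] = z := by
  rw [PySem.Chars.stripChars, pv_strip_pred]
  cases z with
  | nil =>
    rcases htail with h | h <;> subst h <;> rfl
  | cons c z' =>
    have hc := h0 c rfl
    rw [List.cons_append, List.dropWhile_cons, if_neg (by simp [hc]), ← List.cons_append]
    have hrev : ((c :: z') ++ tail).reverse = tail.reverse ++ (c :: z').reverse := by
      rw [List.reverse_append]
    rw [hrev]
    have hdw : ∀ l : List Char, l = (c :: z').reverse →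
        List.dropWhile (· == '_') l = l := by
      intro l hl
      apply pv_dropWhile_id
      intro d hd
      rw [hl, List.head?_reverse] at hd
      exact h1 d hd
    rcases htail with h | h <;> subst h
    · simp only [List.reverse_nil, List.nil_append]
      rw [hdw _ rfl, List.reverse_reverse]
    · rw [show (['_'] : List Char).reverse = ['_'] from rfl]
      rw [List.singleton_append, List.dropWhile_cons, if_pos (by simp)]
      rw [hdw _ rfl, List.reverse_reverse]

theorem pv_strip_collapse (ws : List (List Char)) (h : ∀ w ∈ ws, ('_' : Char) ∉ w) :
    PySem.Chars.stripChars (pvCollapse (pvInter ws)) ['_']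
      = pvInter (ws.filter (fun w => !w.isEmpty)) := by
  induction ws with
  | nil =>
    rw [show pvInter ([] : List (List Char)) = [] from rfl, pv_collapse_nil]
    rfl
  | cons w rest ih =>
    have hrest : ∀ v ∈ rest, ('_' : Char) ∉ v := fun v hv => h v (by simp [hv])
    cases hwe : w with
    | nil =>
      subst hwe
      cases rest with
      | nil =>
        rw [show pvInter [([] : List Char)] = [] from rfl, pv_collapse_nil]
        rfl
      | cons v rest2 =>
        rw [show pvInter (([] : List Char) :: v :: rest2) = pvTailJoin (v :: rest2) from by
          simp [pvInter]]
        rw [show pvTailJoin (v :: rest2) = '_' :: pvInter (v :: rest2) from rfl]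
        rw [pv_strip_collapse_cons]
        rw [ih hrest]
        simp
    | cons a w2 =>
      subst hwe
      have hwu : ('_' : Char) ∉ (a :: w2) := h _ (by simp)
      have ha : a ≠ '_' := fun e => hwu (by simp [e])
      rw [show pvInter ((a :: w2) :: rest) = (a :: w2) ++ pvTailJoin rest from rfl]
      rw [pv_collapse_append _ _ hwu]
      rw [pv_collapse_tailJoin rest hrest]
      rw [← List.append_assoc]
      have hfilt : List.filter (fun w => !w.isEmpty) ((a :: w2) :: rest)
          = (a :: w2) :: List.filter (fun w => !w.isEmpty) rest := by simp
      rw [hfilt]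
      have hz : (a :: w2) ++ pvTailJoin (List.filter (fun w => !w.isEmpty) rest)
          = pvInter ((a :: w2) :: List.filter (fun w => !w.isEmpty) rest) := rfl
      rw [hz] at *
      rw [pv_strip_core _ ?_ ?_ _ ?_]
      · intro c hc
        simp only [pvInter, List.cons_append, List.head?_cons] at hc
        rw [(Option.some.inj hc)] at ha
        exact ha
      · intro c hc
        refine pv_last_ne (List.filter (fun w => !w.isEmpty) rest) (a :: w2) (by simp) hwu ?_ c hc
        intro v hv
        rw [List.mem_filter] at hv
        refine ⟨by simpa using hv.2, hrest v hv.1⟩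
      · split_ifs <;> simp

-- ===== VERDICT (by name: the statement is the Claim_ definition above) =====
theorem sanitize_name_py_spec : Claim_equal_sanitize_name_py := by
  intro name _
  simp only [Spec_sanitize_name_py, sanitize_name_py, sanitize_name_py_alt]
  apply congrArg String.mk
  rw [pv_foldl_enc, pv_loop_eq_collapse, pv_join_eq_inter]
  have htok := pv_foldl_tok name.toList [] []
  simp only [List.nil_append] at htok ⊢
  rw [show pvInter [([] : List Char)] = [] from rfl, List.nil_append] at htok
  rw [← htok]
  exact pv_strip_collapse _ (pv_tok_no_underscore name.toList [] [] (by simp) (by simp))
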